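-- pv_equiv track=rewrite | github.com/ChristopherAsc/CPSC-335-Project2 | exhaustive.py | soccer_exhaustive
-- ===== SOURCE A (Python) =====
-- def soccer_exhaustive(grid):
--     # grid length and width
--     rows = len(grid)
--     cols = len(grid[0])
--
--     # Check if start position (0,0) or end position (rows-1,cols-1) is blocked by opponent
--     if grid[0][0] == 'X' or grid[rows-1][cols-1] == 'X':
--         return 0
--     if not grid or not grid[0]:     #Check if grid is valid
--         return 0
--
--     # Total moves needed to reach the goal
--     path_length = rows + cols - 2
--
--     #Check if bit sequence is a valid path, returns true if valid
--     def is_valid_path(bits):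
--
--         # Start from top left corner
--         row = col = 0
--
--         # Process each bit, move right and move down operation
--         for n in range(path_length):
--             bit = (bits >> n) & 1
--
--             if bit == 1:
--                 col += 1
--             else:
--                 row += 1
--
--             # Check if path goes outside grid boundaries
--             if row >= rows or col >= cols:
--                 return False
--
--             # Check if current position has an opponent
--             if grid[row][col] == 'X':
--                 return False
--
--         # For path to be valid it has to reach bottom right corner
--         return row == rows-1 and col == cols-1
--
--     counter = 0
--
--     # Calculate all possible combinations (2^path_length)
--     max_bits = 1 << path_length
--
--     # Try all possible combinations of moves
--     for bits in range(max_bits):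
--         right_moves = bin(bits).count('1')
--
--         # Skip paths wihtout cols-1 right moves
--         if right_moves != cols-1:
--             continue
--
--         if is_valid_path(bits):
--             counter += 1
--
--     return counter
-- ===== SOURCE B (Python) =====
-- def soccer_exhaustive(grid):
--     cols = len(grid[0])
--     prev = None
--     for row in grid:
--         cur = []
--         for c in range(cols):
--             if row[c] == 'X':
--                 cur.append(0)
--             elif prev is None and c == 0:
--                 cur.append(1)
--             else:
--                 up = prev[c] if prev is not None else 0
--                 left = cur[c - 1] if c > 0 else 0
--                 cur.append(up + left)
--         prev = cur
--     return prev[cols - 1]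
-- ===== Notes on version B (the rewrite author's own statement) =====
-- stated objective: faster
-- what changed: Replaced the exhaustive enumeration of all 2^(rows+cols-2) move bit-sequences with a single-pass dynamic programming sweep that sums the top and left neighbour counts per cell (0 on blocked cells).
-- outside the precondition, e.g. on soccer_exhaustive([['X', '.'], ['.']]): A returns 0, B raises IndexError
import Mathlib
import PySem

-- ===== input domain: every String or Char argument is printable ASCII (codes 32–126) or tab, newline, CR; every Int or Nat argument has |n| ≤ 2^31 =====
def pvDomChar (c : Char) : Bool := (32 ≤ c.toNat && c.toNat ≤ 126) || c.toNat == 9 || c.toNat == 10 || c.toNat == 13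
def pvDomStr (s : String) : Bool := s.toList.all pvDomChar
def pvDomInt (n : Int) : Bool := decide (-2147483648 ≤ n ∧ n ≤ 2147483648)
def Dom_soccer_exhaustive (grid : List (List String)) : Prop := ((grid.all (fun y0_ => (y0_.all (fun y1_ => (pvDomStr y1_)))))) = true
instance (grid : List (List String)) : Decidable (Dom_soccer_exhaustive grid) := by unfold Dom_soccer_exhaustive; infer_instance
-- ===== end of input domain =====

-- B replaces A's exhaustive enumeration of all 2^(rows+cols-2) move sequences by a row-by-row
-- dynamic-programming sweep (objective: faster, asymptotically O(rows*cols) instead of exponential).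

-- ===== PORT A =====
-- grid[r][c]: Python indexing; under Pre_ every access A performs is in range, so getD is exact here.
def xAt (grid : List (List String)) (r c : Nat) : Bool := ((grid.getD r []).getD c "") == "X"

-- bin(bits).count('1')
def popcount : Nat → Nat
  | 0 => 0
  | n + 1 => (n + 1) % 2 + popcount ((n + 1) / 2)
decreasing_by omega

-- is_valid_path: loop `for n in range(path_length)` with early return, as fuel recursion
def aValidGo (grid : List (List String)) (rows cols bits : Nat) : Nat → Nat → Nat → Nat → Bool
  | _n, row, col, 0 => decide (row = rows - 1 ∧ col = cols - 1)
  | n, row, col, fuel + 1 =>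
    let row' := if bits.testBit n then row else row + 1
    let col' := if bits.testBit n then col + 1 else col
    if rows ≤ row' ∨ cols ≤ col' then false
    else if xAt grid row' col' then false
    else aValidGo grid rows cols bits (n + 1) row' col' fuel

def soccer_exhaustive (grid : List (List String)) : Int :=
  let rows := grid.length
  let cols := (grid.getD 0 []).length
  if xAt grid 0 0 || xAt grid (rows - 1) (cols - 1) then 0
  else if grid.isEmpty || (grid.getD 0 []).isEmpty then 0
  else
    let pathLength := rows + cols - 2
    (List.range (2 ^ pathLength)).foldl
      (fun counter bits =>
        if popcount bits ≠ cols - 1 then counter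
        else if aValidGo grid rows cols bits 0 0 0 pathLength then counter + 1
        else counter) 0

-- ===== PORT B =====
-- inner loop `for c in range(cols)` of Source B, building `cur` by appends
def buildRow (row : List String) (prev? : Option (List Int)) (cols : Nat) : List Int :=
  (List.range cols).foldl
    (fun cur c =>
      let v : Int :=
        if (row.getD c "") == "X" then 0
        else if prev?.isNone && c == 0 then 1
        else (match prev? with | some p => p.getD c 0 | none => 0)
             + (if 0 < c then cur.getLast?.getD 0 else 0)
      cur ++ [v]) []

def soccer_exhaustive_alt (grid : List (List String)) : Int :=
  let cols := (grid.headD []).length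
  let prev := grid.foldl (fun p row => some (buildRow row p cols)) (none : Option (List Int))
  (prev.getD []).getD (cols - 1) 0

-- ===== PRECONDITION & SPEC =====
-- Pre_ restricts to the task's natural domain: a nonempty grid whose rows all have at least
-- cols = len(grid[0]) > 0 cells (A indexes grid[0][0] and grid[r][c] for c < cols and raises
-- IndexError otherwise; on a few degenerate ragged grids A still returns 0 via its early
-- blocked-start check while B raises — excluded as outside the natural rectangular domain).
def Pre_soccer_exhaustive (grid : List (List String)) : Prop :=
  grid ≠ [] ∧ 0 < (grid.headD []).length ∧ ∀ row ∈ grid, (grid.headD []).length ≤ row.length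
instance (grid : List (List String)) : Decidable (Pre_soccer_exhaustive grid) := by
  unfold Pre_soccer_exhaustive; infer_instance

def pvWitness_soccer_exhaustive : List (List String) := [[".", "."], [".", "X"], [".", "."]]

def Spec_soccer_exhaustive (grid : List (List String)) (out : Int) : Prop := out = soccer_exhaustive_alt grid
instance (grid : List (List String)) (out : Int) : Decidable (Spec_soccer_exhaustive grid out) := by unfold Spec_soccer_exhaustive; infer_instance

-- ===== CLAIM (what is proved, stated in full; the proofs are below) =====
def Claim_equal_soccer_exhaustive : Prop := ∀ (grid : List (List String)), Dom_soccer_exhaustive grid → Pre_soccer_exhaustive grid → Spec_soccer_exhaustive grid (soccer_exhaustive grid)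

-- ===== LEMMAS AND PROOFS =====

-- number of monotone lattice paths (0,0)→(r,c) avoiding 'X' cells (value at (0,0) checked too)
def fdp (g : List (List String)) : Nat → Nat → Int
  | 0, 0 => if xAt g 0 0 then 0 else 1
  | 0, c + 1 => if xAt g 0 (c + 1) then 0 else fdp g 0 c
  | r + 1, 0 => if xAt g (r + 1) 0 then 0 else fdp g r 0
  | r + 1, c + 1 => if xAt g (r + 1) (c + 1) then 0 else fdp g r (c + 1) + fdp g (r + 1) c

-- position after following bits 0..n-1 of `bits`, `none` once invalid
def walk (g : List (List String)) (rows cols bits : Nat) : Nat → Option (Nat × Nat)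
  | 0 => some (0, 0)
  | n + 1 =>
    match walk g rows cols bits n with
    | none => none
    | some (r, c) =>
      let r' := if bits.testBit n then r else r + 1
      let c' := if bits.testBit n then c + 1 else c
      if rows ≤ r' ∨ cols ≤ c' then none
      else if xAt g r' c' then none
      else some (r', c')

-- number of bits < 2^n whose walk ends at (r,c)
def Wc (g : List (List String)) (R C : Nat) : Nat → Nat → Nat → Int
  | 0, r, c => if r = 0 ∧ c = 0 then 1 else 0
  | n + 1, r, c =>
    if r < R ∧ c < C ∧ xAt g r c = false then
      (if 0 < r then Wc g R C n (r - 1) c else 0) +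
      (if 0 < c then Wc g R C n r (c - 1) else 0)
    else 0

theorem walk_add_none (g : List (List String)) (R C b n : Nat)
    (h : walk g R C b n = none) (k : Nat) : walk g R C b (n + k) = none := by
  induction k with
  | zero => exact h
  | succ k ih => simp [walk, ih]

theorem walk_aValidGo (g : List (List String)) (R C b : Nat) :
    ∀ fuel n row col, walk g R C b n = some (row, col) →
      aValidGo g R C b n row col fuel = decide (walk g R C b (n + fuel) = some (R - 1, C - 1)) := by
  intro fuel
  induction fuel with
  | zero =>
    intro n row col h
    simp [aValidGo, h, Prod.ext_iff]
  | succ fuel ih =>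
    intro n row col h
    rw [show n + (fuel + 1) = (n + 1) + fuel by omega]
    simp only [aValidGo]
    by_cases hb : R ≤ (if b.testBit n then row else row + 1) ∨ C ≤ (if b.testBit n then col + 1 else col)
    · have hw : walk g R C b (n + 1) = none := by
        simp [walk, h]
        intro h1 h2
        exact absurd hb (by simp [h1, h2])
      rw [walk_add_none g R C b (n+1) hw fuel]
      simp [hb]
    · by_cases hx : xAt g (if b.testBit n then row else row + 1) (if b.testBit n then col + 1 else col) = true
      · have hw : walk g R C b (n + 1) = none := by
          simp [walk, h, hb, hx]
        rw [walk_add_none g R C b (n+1) hw fuel]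
        simp [hb, hx]
      · have hw : walk g R C b (n + 1) = some ((if b.testBit n then row else row + 1), (if b.testBit n then col + 1 else col)) := by
          simp [walk, h, hb, hx]
        rw [if_neg hb, if_neg hx, ih (n+1) _ _ hw]
theorem walk_col (g : List (List String)) (R C b : Nat) :
    ∀ n r c, walk g R C b n = some (r, c) → c = (List.range n).countP (fun i => b.testBit i) := by
  intro n
  induction n with
  | zero => intro r c h; simp [walk] at h; simp [h.2.symm]
  | succ n ih =>
    intro r c h
    simp only [walk] at h
    rcases hw : walk g R C b n with _ | ⟨p, q⟩ <;> rw [hw] at h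
    · simp at h
    · have hq := ih p q hw
      rw [List.range_succ, List.countP_append]
      by_cases hb : b.testBit n <;> simp [hb] at h ⊢ <;> omega

theorem popcount_spec : ∀ n b, b < 2 ^ n → popcount b = (List.range n).countP (fun i => b.testBit i) := by
  intro n
  induction n with
  | zero => intro b hb; interval_cases b; simp [popcount]
  | succ n ih =>
    intro b hb
    rw [List.range_succ_eq_map, List.countP_cons, List.countP_map]
    have hdiv : b / 2 < 2 ^ n := by
      have := Nat.pow_succ 2 n ▸ hb; omega
    have h2 : ((List.range n).countP ((fun i => b.testBit i) ∘ Nat.succ)) = popcount (b / 2) := by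
      rw [ih (b / 2) hdiv]
      apply List.countP_congr
      intro i _
      simp [Function.comp, Nat.testBit_add_one]
    rw [h2]
    match b with
    | 0 => simp [popcount]
    | b + 1 =>
      rw [popcount]
      have : ((b+1) % 2 = 1 ∧ (b+1).testBit 0 = true) ∨ ((b+1) % 2 = 0 ∧ (b+1).testBit 0 = false) := by
        rcases Nat.mod_two_eq_zero_or_one (b+1) with h | h
        · right; exact ⟨h, by simp [Nat.testBit_zero]; omega⟩
        · left; exact ⟨h, by simp [Nat.testBit_zero]; omega⟩
      rcases this with ⟨h1, h2⟩ | ⟨h1, h2⟩ <;> simp [h1, h2] <;> omega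
theorem walk_congr (g : List (List String)) (R C b b' : Nat) (n : Nat)
    (h : ∀ i, i < n → b.testBit i = b'.testBit i) : walk g R C b n = walk g R C b' n := by
  induction n with
  | zero => rfl
  | succ n ih =>
    have := ih (fun i hi => h i (Nat.lt_succ_of_lt hi))
    simp [walk, this, h n (Nat.lt_succ_self n)]

theorem walk_mod (g : List (List String)) (R C b n : Nat) :
    walk g R C (b % 2 ^ n) n = walk g R C b n := by
  refine walk_congr g R C _ _ n (fun i hi => ?_)
  simp [Nat.testBit_mod_two_pow, hi]

theorem step_down (g : List (List String)) (R C b n r c : Nat) (hbit : b.testBit n = false) :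
    walk g R C b (n + 1) = some (r, c) ↔
      ((0 < r ∧ r < R ∧ c < C ∧ xAt g r c = false) ∧ walk g R C b n = some (r - 1, c)) := by
  simp only [walk, hbit]
  rcases hw : walk g R C b n with _ | ⟨p, q⟩
  · simp
  · simp only [Bool.false_eq_true, if_false]
    split_ifs with h1 h2
    · simp only [reduceCtorEq, false_iff]
      rintro ⟨⟨h3, h4, h5, h6⟩, h7, h8⟩; omega
    · simp only [reduceCtorEq, false_iff]
      rintro ⟨⟨h3, h4, h5, h6⟩, h7, h8⟩
      rw [Nat.sub_add_cancel h3] at h2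
      simp [h2] at h6
    · simp only [Option.some.injEq, Prod.mk.injEq]
      constructor
      · rintro ⟨h3, h4⟩
        subst h3; subst h4
        exact ⟨⟨by omega, by omega, by omega, by simpa using h2⟩, by omega, rfl⟩
      · rintro ⟨⟨hr0, hR, hC, hx⟩, hp, hq⟩; omega

theorem step_right (g : List (List String)) (R C b n r c : Nat) (hbit : b.testBit n = true) :
    walk g R C b (n + 1) = some (r, c) ↔
      ((0 < c ∧ r < R ∧ c < C ∧ xAt g r c = false) ∧ walk g R C b n = some (r, c - 1)) := by
  simp only [walk, hbit]
  rcases hw : walk g R C b n with _ | ⟨p, q⟩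
  · simp
  · simp only [if_true]
    split_ifs with h1 h2
    · simp only [reduceCtorEq, false_iff]
      rintro ⟨⟨h3, h4, h5, h6⟩, h7, h8⟩; omega
    · simp only [reduceCtorEq, false_iff]
      rintro ⟨⟨h3, h4, h5, h6⟩, h7, h8⟩
      rw [Nat.sub_add_cancel h3] at h2
      simp [h2] at h6
    · simp only [Option.some.injEq, Prod.mk.injEq]
      constructor
      · rintro ⟨h3, h4⟩
        subst h3; subst h4
        exact ⟨⟨by omega, by omega, by omega, by simpa using h2⟩, rfl, by omega⟩
      · rintro ⟨⟨hc0, hR, hC, hx⟩, hp, hq⟩; omega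
theorem countP_congr' {l : List Nat} {p q : Nat → Bool} (h : ∀ a ∈ l, p a = q a) :
    l.countP p = l.countP q :=
  List.countP_congr (fun a ha => by rw [h a ha])

theorem count_walk (g : List (List String)) (R C : Nat) :
    ∀ n r c, (((List.range (2 ^ n)).countP (fun b => decide (walk g R C b n = some (r, c)))) : Int)
      = Wc g R C n r c := by
  intro n
  induction n with
  | zero =>
    intro r c
    by_cases h : r = 0 ∧ c = 0
    · simp [walk, Wc, h, Prod.ext_iff]
    · have : ¬ (some ((0 : Nat), (0 : Nat)) = some (r, c)) := by
        simp [Prod.ext_iff]; omega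
      simp [walk, Wc, h, this]
  | succ n ih =>
    intro r c
    have hsplit : List.range (2 ^ (n + 1)) = List.range (2 ^ n) ++ (List.range (2 ^ n)).map (2 ^ n + ·) := by
      rw [pow_succ, Nat.mul_two, List.range_add]
    rw [hsplit, List.countP_append, List.countP_map]
    -- low half: high bit 0 (a down-step last)
    have hlow : (List.range (2 ^ n)).countP (fun b => decide (walk g R C b (n + 1) = some (r, c)))
        = (List.range (2 ^ n)).countP (fun b =>
            decide (0 < r ∧ r < R ∧ c < C ∧ xAt g r c = false) && decide (walk g R C b n = some (r - 1, c))) := by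
      refine countP_congr' (fun b hb => ?_)
      have hbit : b.testBit n = false := Nat.testBit_lt_two_pow (List.mem_range.mp hb)
      rw [← Bool.decide_and, decide_eq_decide]
      exact step_down g R C b n r c hbit
    -- high half: high bit 1 (a right-step last)
    have hhigh : (List.range (2 ^ n)).countP ((fun b => decide (walk g R C b (n + 1) = some (r, c))) ∘ (2 ^ n + ·))
        = (List.range (2 ^ n)).countP (fun b =>
            decide (0 < c ∧ r < R ∧ c < C ∧ xAt g r c = false) && decide (walk g R C b n = some (r, c - 1))) := by
      refine countP_congr' (fun b hb => ?_)
      have hb' : b < 2 ^ n := List.mem_range.mp hb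
      have hbit : (2 ^ n + b).testBit n = true := by
        rw [Nat.testBit, Nat.shiftRight_eq_div_pow]
        have : (2 ^ n + b) / 2 ^ n = 1 := by
          rw [Nat.add_div_of_dvd_right ⟨1, by ring⟩]
          simp [Nat.div_eq_of_lt hb']
        simp [this]
      have hwalk : walk g R C (2 ^ n + b) n = walk g R C b n := by
        rw [← walk_mod g R C (2 ^ n + b) n]
        congr 1
        rw [Nat.add_mod_left, Nat.mod_eq_of_lt hb']
      simp only [Function.comp]
      rw [← Bool.decide_and, decide_eq_decide]
      rw [step_right g R C (2 ^ n + b) n r c hbit, hwalk]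
    rw [hlow, hhigh]
    by_cases hmain : r < R ∧ c < C ∧ xAt g r c = false
    · have e1 : ((List.range (2 ^ n)).countP (fun b =>
            decide (0 < r ∧ r < R ∧ c < C ∧ xAt g r c = false) && decide (walk g R C b n = some (r - 1, c))) : Int)
          = if 0 < r then Wc g R C n (r - 1) c else 0 := by
        by_cases hr : 0 < r
        · rw [if_pos hr, ← ih (r - 1) c]
          congr 1
          refine countP_congr' (fun b _ => ?_)
          simp [hr, hmain.1, hmain.2.1, hmain.2.2]
        · rw [if_neg hr]
          have : (List.range (2 ^ n)).countP (fun b =>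
              decide (0 < r ∧ r < R ∧ c < C ∧ xAt g r c = false) && decide (walk g R C b n = some (r - 1, c))) = 0 := by
            rw [List.countP_eq_zero]
            intro b _
            simp [hr]
          rw [this]; rfl
      have e2 : ((List.range (2 ^ n)).countP (fun b =>
            decide (0 < c ∧ r < R ∧ c < C ∧ xAt g r c = false) && decide (walk g R C b n = some (r, c - 1))) : Int)
          = if 0 < c then Wc g R C n r (c - 1) else 0 := by
        by_cases hc : 0 < c
        · rw [if_pos hc, ← ih r (c - 1)]
          congr 1
          refine countP_congr' (fun b _ => ?_)
          simp [hc, hmain.1, hmain.2.1, hmain.2.2]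
        · rw [if_neg hc]
          have : (List.range (2 ^ n)).countP (fun b =>
              decide (0 < c ∧ r < R ∧ c < C ∧ xAt g r c = false) && decide (walk g R C b n = some (r, c - 1))) = 0 := by
            rw [List.countP_eq_zero]
            intro b _
            simp [hc]
          rw [this]; rfl
      rw [Wc, if_pos hmain]
      push_cast
      rw [e1, e2]
    · have z1 : (List.range (2 ^ n)).countP (fun b =>
          decide (0 < r ∧ r < R ∧ c < C ∧ xAt g r c = false) && decide (walk g R C b n = some (r - 1, c))) = 0 := by
        rw [List.countP_eq_zero]; intro b _; simp; tauto
      have z2 : (List.range (2 ^ n)).countP (fun b =>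
          decide (0 < c ∧ r < R ∧ c < C ∧ xAt g r c = false) && decide (walk g R C b n = some (r, c - 1))) = 0 := by
        rw [List.countP_eq_zero]; intro b _; simp; tauto
      rw [z1, z2, Wc, if_neg hmain]
      rfl
theorem fdp_of_x (g : List (List String)) (r c : Nat) (h : xAt g r c = true) : fdp g r c = 0 := by
  match r, c with
  | 0, 0 => rw [fdp, if_pos h]
  | 0, c + 1 => rw [fdp, if_pos h]
  | r + 1, 0 => rw [fdp, if_pos h]
  | r + 1, c + 1 => rw [fdp, if_pos h]

theorem fdp_zero (g : List (List String)) (h : xAt g 0 0 = true) : ∀ r c, fdp g r c = 0 := by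
  have key : ∀ n r c, r + c ≤ n → fdp g r c = 0 := by
    intro n
    induction n with
    | zero =>
      intro r c hn
      have : r = 0 ∧ c = 0 := by omega
      obtain ⟨rfl, rfl⟩ := this
      simp [fdp, h]
    | succ n ih =>
      intro r c hn
      match r, c with
      | 0, 0 => simp [fdp, h]
      | 0, c + 1 => rw [fdp]; split <;> simp [ih 0 c (by omega)]
      | r + 1, 0 => rw [fdp]; split <;> simp [ih r 0 (by omega)]
      | r + 1, c + 1 => rw [fdp]; split <;> simp [ih r (c + 1) (by omega), ih (r + 1) c (by omega)]
  exact fun r c => key (r + c) r c (le_refl _)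

theorem Wc_eq_fdp (g : List (List String)) (R C : Nat) (h0 : xAt g 0 0 = false) :
    ∀ n r c, r + c = n → r < R → c < C → Wc g R C n r c = fdp g r c := by
  intro n
  induction n with
  | zero =>
    intro r c hn hr hc
    have : r = 0 ∧ c = 0 := by omega
    obtain ⟨rfl, rfl⟩ := this
    simp [Wc, fdp, h0]
  | succ n ih =>
    intro r c hn hR hC
    by_cases hx : xAt g r c = true
    · rw [Wc, if_neg (by simp [hx]), fdp_of_x g r c hx]
    · rw [Wc, if_pos ⟨hR, hC, by simpa using hx⟩]
      match r, c with
      | 0, 0 => omega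
      | 0, c + 1 =>
        rw [fdp, if_neg hx]
        simp only [Nat.lt_irrefl, Nat.zero_lt_succ, if_true, if_false, Nat.add_sub_cancel, zero_add]
        exact ih 0 c (by omega) hR (by omega)
      | r + 1, 0 =>
        rw [fdp, if_neg hx]
        simp only [Nat.lt_irrefl, Nat.zero_lt_succ, if_true, if_false, Nat.add_sub_cancel, add_zero]
        exact ih r 0 (by omega) (by omega) hC
      | r + 1, c + 1 =>
        rw [fdp, if_neg hx]
        simp only [Nat.zero_lt_succ, if_true, Nat.add_sub_cancel]
        rw [ih r (c + 1) (by omega) (by omega) hC, ih (r + 1) c (by omega) (by omega) (by omega)]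
theorem buildRow_spec (grid : List (List String)) (cols r : Nat) (prev? : Option (List Int))
    (hp : prev? = if r = 0 then none else some ((List.range cols).map (fdp grid (r - 1)))) :
    buildRow (grid.getD r []) prev? cols = (List.range cols).map (fdp grid r) := by
  subst hp
  have key : ∀ j, j ≤ cols →
      (List.range j).foldl
        (fun cur c =>
          let v : Int :=
            if ((grid.getD r []).getD c "") == "X" then 0
            else if (if r = 0 then none else some ((List.range cols).map (fdp grid (r - 1)))).isNone && c == 0 then 1
            else (match (if r = 0 then none else some ((List.range cols).map (fdp grid (r - 1)))) with
                   | some p => p.getD c 0 | none => 0)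
                 + (if 0 < c then cur.getLast?.getD 0 else 0)
          cur ++ [v]) []
      = (List.range j).map (fdp grid r) := by
    intro j
    induction j with
    | zero => intro _; rfl
    | succ j ih =>
      intro hj
      rw [List.range_succ, List.foldl_append, List.map_append, ih (by omega)]
      simp only [List.foldl_cons, List.foldl_nil, List.map_cons, List.map_nil]
      congr 1
      have hxj : (((grid.getD r []).getD j "") == "X") = xAt grid r j := rfl
      by_cases hx : xAt grid r j = true
      · simp only [hxj, hx, if_true]
        rw [fdp_of_x grid r j hx]
      · simp only [hxj, hx, if_false]
        have hleft : 0 < j → ((List.range j).map (fdp grid r)).getLast?.getD 0 = fdp grid r (j - 1) := by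
          intro hj0
          rw [show j = (j - 1) + 1 by omega, List.range_succ, List.map_append]
          simp
        match r, j with
        | 0, 0 =>
          simp [fdp, hx]
        | 0, j + 1 =>
          simp only [if_pos rfl, Option.isNone_none, Nat.add_eq_zero_iff, beq_iff_eq]
          rw [fdp, if_neg hx]
          have := hleft (by omega)
          simp only [Nat.add_sub_cancel] at this
          rw [List.getLast?_map] at this
          simpa using this
        | r + 1, 0 =>
          simp only [Nat.succ_ne_zero, if_false, Option.isNone_some, Bool.false_and, Nat.add_sub_cancel]
          rw [fdp, if_neg hx]
          simp only [Nat.lt_irrefl, if_false]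
          simp [List.getElem?_range (show 0 < cols by omega)]
        | r + 1, j + 1 =>
          simp only [Nat.succ_ne_zero, if_false, Option.isNone_some, Bool.false_and, Nat.add_sub_cancel]
          rw [fdp, if_neg hx]
          have h2 := hleft (by omega)
          simp only [Nat.add_sub_cancel] at h2
          rw [List.getLast?_map] at h2
          simp [List.getElem?_range (show j + 1 < cols by omega), h2]
  unfold buildRow
  exact key cols (le_refl _)

theorem foldl_rows (grid : List (List String)) (cols : Nat) :
    ∀ (l : List (List String)) (r : Nat) (acc : Option (List Int)),
      grid.drop r = l →
      acc = (if r = 0 then none else some ((List.range cols).map (fdp grid (r - 1)))) →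
      l.foldl (fun p row => some (buildRow row p cols)) acc
        = if r + l.length = 0 then none
          else some ((List.range cols).map (fdp grid (r + l.length - 1))) := by
  intro l
  induction l with
  | nil =>
    intro r acc hd ha
    simpa using ha
  | cons row l' ih =>
    intro r acc hd ha
    have hrow : grid.getD r [] = row := by
      rw [List.getD_eq_getElem?_getD, ← List.head?_drop, hd]
      rfl
    rw [List.foldl_cons]
    have hb : buildRow row acc cols = (List.range cols).map (fdp grid r) := by
      rw [← hrow]
      exact buildRow_spec grid cols r acc ha
    have hd' : grid.drop (r + 1) = l' := by
      rw [← List.tail_drop, hd]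
      rfl
    have := ih (r + 1) (some (buildRow row acc cols)) hd'
      (by rw [hb]; simp)
    rw [this]
    have h1 : r + 1 + l'.length = r + (row :: l').length := by simp; omega
    rw [h1]

theorem alt_eq_fdp (grid : List (List String)) (h : grid ≠ [])
    (hc : 0 < (grid.headD []).length) :
    soccer_exhaustive_alt grid
      = fdp grid (grid.length - 1) ((grid.headD []).length - 1) := by
  unfold soccer_exhaustive_alt
  have hlen : grid.length ≠ 0 := by simpa [List.length_eq_zero_iff] using h
  show ((grid.foldl (fun p row => some (buildRow row p ((grid.headD []).length))) none).getD
      []).getD ((grid.headD []).length - 1) 0 = _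
  rw [foldl_rows grid ((grid.headD []).length) grid 0 none (by simp) (by simp)]
  rw [if_neg (by omega)]
  simp only [Option.getD_some, Nat.zero_add]
  exact PySem.List.getD_map_range _ _ _ _ (by omega)

theorem foldl_count_ite (l : List Nat) (p q : Nat → Prop) [DecidablePred p] [DecidablePred q] :
    ∀ acc : Int,
      l.foldl (fun counter bits => if p bits then counter else if q bits then counter + 1 else counter) acc
        = acc + l.countP (fun b => decide (¬ p b ∧ q b)) := by
  induction l with
  | nil => intro acc; simp
  | cons x l ih =>
    intro acc
    rw [List.foldl_cons, List.countP_cons, ih]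
    by_cases hp : p x
    · simp [hp]
    · by_cases hq : q x
      · simp only [hp, hq, if_false, if_true, and_true, not_false_iff, decide_true]
        push_cast
        ring
      · simp [hp, hq]
-- ===== VERDICT (by name: the statement is the Claim_ definition above) =====
theorem soccer_exhaustive_spec : Claim_equal_soccer_exhaustive := by
  intro grid _hdom hpre
  obtain ⟨hne, hc, _hrect⟩ := hpre
  unfold Spec_soccer_exhaustive
  have hhead : grid.getD 0 [] = grid.headD [] := by
    cases grid with
    | nil => exact absurd rfl hne
    | cons a t => rfl
  have hlen : grid.length ≠ 0 := by simpa [List.length_eq_zero_iff] using hne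
  have halt : soccer_exhaustive_alt grid
      = fdp grid (grid.length - 1) ((grid.headD []).length - 1) := alt_eq_fdp grid hne hc
  unfold soccer_exhaustive
  by_cases hx : (xAt grid 0 0 || xAt grid (grid.length - 1) ((grid.getD 0 []).length - 1)) = true
  · rw [if_pos hx, halt]
    rcases Bool.or_eq_true_iff.mp hx with h0 | h1
    · exact (fdp_zero grid h0 _ _).symm
    · rw [hhead] at h1
      exact (fdp_of_x grid _ _ h1).symm
  · rw [if_neg hx]
    have hor := Bool.or_eq_false_iff.mp (Bool.eq_false_iff.mpr hx)
    have hx0 : xAt grid 0 0 = false := hor.1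
    have hx1 : xAt grid (grid.length - 1) ((grid.getD 0 []).length - 1) = false := hor.2
    have hemp : (grid.isEmpty || (grid.getD 0 []).isEmpty) = false := by
      rw [hhead]
      cases grid with
      | nil => exact absurd rfl hne
      | cons a t =>
        simp only [List.headD_cons] at hc
        simp only [List.isEmpty_cons, Bool.false_or, List.headD_cons, List.isEmpty_eq_false_iff,
          ← List.length_pos_iff]
        omega
    rw [hemp]
    simp only [if_false, Bool.false_eq_true]
    set R := grid.length with hR
    set C := (grid.getD 0 []).length with hCdef
    have hC1 : 0 < C := by rw [hCdef, hhead]; exact hc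
    have hR1 : 0 < R := by omega
    set L := R + C - 2 with hL
    rw [foldl_count_ite (List.range (2 ^ L))
      (fun bits => popcount bits ≠ C - 1)
      (fun bits => aValidGo grid R C bits 0 0 0 L = true) 0]
    have hcong : (List.range (2 ^ L)).countP
          (fun b => decide (¬ popcount b ≠ C - 1 ∧ aValidGo grid R C b 0 0 0 L = true))
        = (List.range (2 ^ L)).countP
          (fun b => decide (walk grid R C b L = some (R - 1, C - 1))) := by
      refine countP_congr' (fun b hb => ?_)
      have hb' : b < 2 ^ L := List.mem_range.mp hb
      have hval : aValidGo grid R C b 0 0 0 L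
          = decide (walk grid R C b (0 + L) = some (R - 1, C - 1)) :=
        walk_aValidGo grid R C b L 0 0 0 rfl
      rw [Nat.zero_add] at hval
      rw [hval]
      by_cases hw : walk grid R C b L = some (R - 1, C - 1)
      · have hpc : popcount b = C - 1 := by
          rw [popcount_spec L b hb']
          exact (walk_col grid R C b L (R - 1) (C - 1) hw).symm
        simp [hw, hpc]
      · simp [hw]
    rw [hcong, zero_add]
    have hx0' : xAt grid 0 0 = false := hx0
    rw [count_walk grid R C L (R - 1) (C - 1)]
    rw [Wc_eq_fdp grid R C hx0' L (R - 1) (C - 1) (by omega) (by omega) (by omega)]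
    rw [halt, hCdef, hhead]
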